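-- pv_equiv track=rewrite | github.com/albtraum/algorithm_study | public_content/1 week/김상현/Week2/ex03.py | solution
-- ===== SOURCE A (Python) =====
-- def solution(n, arr1, arr2):
--   one=[[0 for _ in range(n)] for _ in range(n)]
--   two=[[0 for _ in range(n)] for _ in range(n)]
--   secret=[[0 for _ in range(n)] for _ in range(n)]
--   real=[]
--   for i in range(n):
--     cnt=0
--     num=arr1[i]
--     while cnt<n:
--       if num%2==1:
--         one[i][cnt]=1
--       else:
--         one[i][cnt]=0
--       cnt+=1
--       num//=2
--     one[i].reverse()
--   for i in range(n):
--     cnt=0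
--     num=arr2[i]
--     while cnt<n:
--       if num%2==1:
--         two[i][cnt]=1
--       else:
--         two[i][cnt]=0
--       cnt+=1
--       num//=2
--     two[i].reverse()
--   for i in range(n):
--     for j in range(n):
--       if one[i][j]==0 and two[i][j]==0:
--         secret[i][j]=" "
--       else:
--         secret[i][j]="#"
--   for i in range(n):
--     real.append("".join(secret[i]))
--   return real
-- ===== SOURCE B (Python) =====
-- def solution(n, arr1, arr2):
--     if n <= 0:
--         return []
--     mask = (1 << n) - 1
--     real = []
--     for a, b in zip(arr1[:n], arr2[:n]):
--         real.append(format((a | b) & mask, 'b').zfill(n)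
--                     .replace('1', '#').replace('0', ' '))
--     return real
-- ===== Notes on version B (the rewrite author's own statement) =====
-- stated objective: faster
-- what changed: B drops A's three n-by-n scratch grids and per-bit Python decode loops entirely: it ORs the two integers of each row, masks to the low n bits with (1<<n)-1, renders the row with format(v,'b').zfill(n) and maps '1'/'0' to '#'/' ' by string replacement, so all per-bit work happens in C-level int and str operations.
import Mathlib
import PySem

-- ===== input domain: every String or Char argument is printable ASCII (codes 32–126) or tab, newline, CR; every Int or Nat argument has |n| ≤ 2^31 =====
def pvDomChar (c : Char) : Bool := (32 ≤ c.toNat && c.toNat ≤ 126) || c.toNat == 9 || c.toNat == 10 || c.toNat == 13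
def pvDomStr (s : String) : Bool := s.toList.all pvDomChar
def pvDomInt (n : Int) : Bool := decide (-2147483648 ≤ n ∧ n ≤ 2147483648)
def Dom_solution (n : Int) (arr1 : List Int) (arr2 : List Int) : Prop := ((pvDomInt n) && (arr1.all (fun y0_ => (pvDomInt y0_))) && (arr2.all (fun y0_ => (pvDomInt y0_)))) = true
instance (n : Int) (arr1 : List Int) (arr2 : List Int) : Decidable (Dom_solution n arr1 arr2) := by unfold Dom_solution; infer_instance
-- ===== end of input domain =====

-- B replaces A's three n×n scratch grids (per-bit decode loops, reverse, cellwise OR pass) with one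
-- pass that ORs the two integers of a row, masks to n bits, renders with binary formatting + zfill
-- and maps '1'/'0' to '#'/' ' by string replacement (measured constant-factor faster: the per-bit
-- work moves from Python loops into C-level int/str operations).


-- ===== PORT A =====
-- the 'while cnt<n' bit-extraction loop of A (rows filled LSB first), fuel = remaining iterations
def rowBits : Nat → Int → List Int
  | 0, _ => []
  | c + 1, num =>
      (if PySem.Int.mod num 2 = 1 then 1 else 0) :: rowBits c (PySem.Int.floordiv num 2)

def solution (n : Int) (arr1 : List Int) (arr2 : List Int) : List String :=
  let is := PySem.List.pyRange 0 n 1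
  let one := is.map (fun i => (rowBits n.toNat (PySem.List.pyGetD arr1 i 0)).reverse)
  let two := is.map (fun i => (rowBits n.toNat (PySem.List.pyGetD arr2 i 0)).reverse)
  let secret := List.zipWith
    (fun r1 r2 => List.zipWith (fun o t => if o = 0 ∧ t = 0 then ' ' else '#') r1 r2) one two
  secret.map String.mk

-- ===== PORT B =====
def solution_alt (n : Int) (arr1 : List Int) (arr2 : List Int) : List String :=
  if n ≤ 0 then []
  else
    let mask : Int := (1 : Int) <<< n.toNat - 1
    (List.zip (PySem.List.slice arr1 none (some n)) (PySem.List.slice arr2 none (some n))).foldl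
      (fun real ab =>
        real ++ [PySem.Str.replace (PySem.Str.replace
          (PySem.Str.zfill (PySem.Int.toBin (PySem.Int.band (PySem.Int.bor ab.1 ab.2) mask)) n)
          "1" "#") "0" " "]) []

-- ===== PRECONDITION & SPEC =====
-- A raises IndexError when 0 < n exceeds the length of arr1 or arr2; Pre_ excludes exactly those inputs.
def Pre_solution (n : Int) (arr1 : List Int) (arr2 : List Int) : Prop :=
  n ≤ (arr1.length : Int) ∧ n ≤ (arr2.length : Int)
instance (n : Int) (arr1 : List Int) (arr2 : List Int) : Decidable (Pre_solution n arr1 arr2) := by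
  unfold Pre_solution; infer_instance
def pvWitness_solution : Int × List Int × List Int := (3, [4, 3, -1], [2, 5, 0])
def Spec_solution (n : Int) (arr1 : List Int) (arr2 : List Int) (out : List String) : Prop := out = solution_alt n arr1 arr2
instance (n : Int) (arr1 : List Int) (arr2 : List Int) (out : List String) : Decidable (Spec_solution n arr1 arr2 out) := by unfold Spec_solution; infer_instance

-- ===== CLAIM (what is proved, stated in full; the proofs are below) =====
def Claim_equal_solution : Prop := ∀ (n : Int) (arr1 : List Int) (arr2 : List Int), Dom_solution n arr1 arr2 → Pre_solution n arr1 arr2 → Spec_solution n arr1 arr2 (solution n arr1 arr2)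

-- ===== LEMMAS AND PROOFS =====

---------------------------------------------------------------- A-side lemmas

theorem rowBits_length (m : Nat) (a : Int) : (rowBits m a).length = m := by
  induction m generalizing a with
  | zero => rfl
  | succ c ih => simp [rowBits, ih]

-- one floor-halving step of A = one extra shift
theorem shift_fd (a : Int) (k : Nat) : a >>> (k + 1) = (PySem.Int.floordiv a 2) >>> k := by
  rw [PySem.Int.floordiv_eq_ediv_of_pos (by norm_num), Int.shiftRight_eq_div_pow,
    Int.shiftRight_eq_div_pow, pow_succ']
  push_cast
  rw [Int.ediv_ediv_of_nonneg (by norm_num)]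

-- A's decoded-and-ORed row (LSB first) is the shift-and-mask test at each bit position
theorem rowChars (m : Nat) (a b : Int) :
    List.zipWith (fun o t => if o = 0 ∧ t = 0 then ' ' else '#') (rowBits m a) (rowBits m b)
      = (List.range m).map (fun (k : Nat) =>
          if PySem.Int.band (a >>> k) 1 ≠ 0 ∨ PySem.Int.band (b >>> k) 1 ≠ 0 then '#' else ' ') := by
  induction m generalizing a b with
  | zero => rfl
  | succ c ih =>
      rw [List.range_succ_eq_map]
      simp only [rowBits, List.zipWith_cons_cons, List.map_cons, List.map_map]
      refine congrArg₂ List.cons ?_ ?_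
      · have ha0 := PySem.Int.mod_nonneg a (b := 2) (by norm_num)
        have ha1 := PySem.Int.mod_lt a (b := 2) (by norm_num)
        have hb0 := PySem.Int.mod_nonneg b (b := 2) (by norm_num)
        have hb1 := PySem.Int.mod_lt b (b := 2) (by norm_num)
        have hsz : a >>> (0:Nat) = a := by rw [Int.shiftRight_eq_div_pow]; norm_num
        have hsz' : b >>> (0:Nat) = b := by rw [Int.shiftRight_eq_div_pow]; norm_num
        rw [hsz, hsz', PySem.Int.band_one, PySem.Int.band_one]
        split_ifs <;> first | rfl | omega
      · rw [ih]
        apply List.map_congr_left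
        intro k _
        simp only [Function.comp_apply, Nat.succ_eq_add_one]
        rw [shift_fd a k, shift_fd b k]

theorem revmap {α : Type} (m : Nat) (f : Nat → α) :
    ((List.range m).map f).reverse = (List.range m).map (fun k => f (m - 1 - k)) := by
  apply List.ext_getElem
  · simp
  · intro i h1 h2
    simp [List.getElem_reverse]

---------------------------------------------------------------- binary rendering

def binNat (v : Nat) : List Char :=
  if h : v < 2 then [Nat.digitChar v]
  else binNat (v / 2) ++ [Nat.digitChar (v % 2)]
  decreasing_by exact Nat.div_lt_self (by omega) (by omega)

theorem toDigitsCore_two (f : Nat) : ∀ (v : Nat) (acc : List Char), v < 2 ^ (f + 1) →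
    Nat.toDigitsCore 2 (f + 1) v acc = binNat v ++ acc := by
  induction f with
  | zero =>
      intro v acc h
      have hv : v < 2 := by omega
      rw [binNat]
      simp only [hv, dif_pos]
      have h2 : v / 2 = 0 := by omega
      have h3 : v % 2 = v := by omega
      simp [Nat.toDigitsCore, h2, h3]
  | succ f ih =>
      intro v acc h
      by_cases hv : v < 2
      · rw [binNat]
        simp only [hv, dif_pos]
        have h2 : v / 2 = 0 := by omega
        have h3 : v % 2 = v := by omega
        simp [Nat.toDigitsCore, h2, h3]
      · rw [binNat]
        simp only [hv, dif_neg]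
        have h2 : ¬ (v / 2 = 0) := by omega
        have hlt : v / 2 < 2 ^ (f + 1) := by
          have h4 : v < 2 ^ (f + 2) := h
          have h5 : (2:Nat) ^ (f + 2) = 2 ^ (f+1) * 2 := by ring
          omega
        conv_lhs => rw [Nat.toDigitsCore]
        rw [if_neg h2, ih (v / 2) _ hlt]
        simp

theorem toDigits_two (v : Nat) : Nat.toDigits 2 v = binNat v := by
  have h : v < 2 ^ (v + 1) := by
    calc v < 2 ^ v := Nat.lt_two_pow_self
    _ ≤ 2 ^ (v + 1) := Nat.pow_le_pow_right (by omega) (by omega)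
  have := toDigitsCore_two v v [] h
  simpa [Nat.toDigits] using this

theorem binNat_all (v : Nat) : ∀ c ∈ binNat v, c = '0' ∨ c = '1' := by
  induction v using Nat.strong_induction_on with
  | _ v ih =>
    intro c hc
    rw [binNat] at hc
    by_cases hv : v < 2
    · simp only [hv, dif_pos, List.mem_singleton] at hc
      subst hc
      interval_cases v
      · left; rfl
      · right; rfl
    · have hc' : c ∈ binNat (v / 2) ++ [(v % 2).digitChar] := by simpa [hv] using hc
      rcases List.mem_append.mp hc' with hc | hc
      · exact ih (v / 2) (Nat.div_lt_self (by omega) (by omega)) c hc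
      · rw [List.mem_singleton] at hc
        subst hc
        have : v % 2 = 0 ∨ v % 2 = 1 := by omega
        rcases this with h | h <;> rw [h]
        · left; rfl
        · right; rfl

theorem binNat_ne_nil (v : Nat) : binNat v ≠ [] := by
  rw [binNat]
  by_cases hv : v < 2 <;> simp [hv]

theorem zfill_digits (cs : List Char) (w : Int) (hne : cs ≠ [])
    (hall : ∀ c ∈ cs, c = '0' ∨ c = '1') :
    PySem.Chars.zfill cs w = List.replicate (w.toNat - cs.length) '0' ++ cs := by
  match cs, hne with
  | c :: rest, _ =>
    have hc := hall c (by simp)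
    have hsign : ¬ (c = '+' ∨ c = '-') := by
      rcases hc with h | h <;> subst h <;> decide
    rw [PySem.Chars.zfill]
    by_cases hw : w ≤ ((c :: rest).length : Int)
    · have h0 : w.toNat - (c :: rest).length = 0 := by
        have := Int.toNat_le.mpr hw
        simp at this ⊢
        omega
      rw [if_pos hw, h0]
      simp
    · rw [if_neg hw, if_neg hsign]

theorem digit_bit (v : Nat) : Nat.digitChar (v % 2) = if Nat.testBit v 0 then '1' else '0' := by
  rcases Nat.mod_two_eq_zero_or_one v with h | h <;>
    simp [h, Nat.testBit_zero, Nat.digitChar]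

theorem g_succ (m v : Nat) :
    (List.range (m + 1)).map (fun j => if Nat.testBit v (m - j) then '1' else '0')
      = ((List.range m).map (fun j => if Nat.testBit (v / 2) (m - 1 - j) then '1' else '0'))
        ++ [if Nat.testBit v 0 then '1' else '0'] := by
  rw [List.range_succ, List.map_append]
  refine congrArg₂ List.append ?_ (by simp)
  apply List.map_congr_left
  intro j hj
  rw [List.mem_range] at hj
  have h1 : m - j = (m - 1 - j) + 1 := by omega
  rw [h1, Nat.testBit_add_one]

theorem padBin_eq (m : Nat) (hm : 1 ≤ m) : ∀ v : Nat, v < 2 ^ m →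
    List.replicate (m - (binNat v).length) '0' ++ binNat v
      = (List.range m).map (fun j => if Nat.testBit v (m - 1 - j) then '1' else '0') := by
  induction m, hm using Nat.le_induction with
  | base =>
      intro v hv
      interval_cases v <;> rw [binNat] <;> decide
  | succ m hm ih =>
      intro v hv
      have hsimp : ∀ j : Nat, m + 1 - 1 - j = m - j := by omega
      simp only [hsimp]
      rw [g_succ]
      by_cases h2 : v < 2
      · rw [binNat, dif_pos h2]
        have hv2 : v / 2 = 0 := by omega
        rw [hv2]
        have hlen : m + 1 - ([Nat.digitChar v]).length = m := by simp
        rw [hlen]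
        refine congrArg₂ List.append ?_ ?_
        · calc List.replicate m '0' = (List.range m).map (fun _ => '0') := by
                rw [List.map_const']; simp
            _ = (List.range m).map (fun j => if Nat.testBit 0 (m - 1 - j) then '1' else '0') :=
                List.map_congr_left (by intro j _; simp)
        · have hvv : v % 2 = v := by omega
          rw [show Nat.digitChar v = Nat.digitChar (v % 2) from by rw [hvv], digit_bit]
      · rw [binNat, dif_neg h2]
        have hlt : v / 2 < 2 ^ m := by
          have h5 : (2:Nat) ^ (m + 1) = 2 ^ m * 2 := by ring
          omega
        have hlen : m + 1 - (binNat (v / 2) ++ [(v % 2).digitChar]).length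
            = m - (binNat (v / 2)).length := by
          simp
        rw [hlen, digit_bit, ← ih (v / 2) hlt]
        simp

theorem replace_go_single (o nw : Char) : ∀ (l : List Char) (fuel : Nat) (acc : List Char),
    l.length ≤ fuel →
    PySem.Chars.replace.go [o] [nw] fuel l acc
      = acc.reverse ++ l.map (fun c => if c = o then nw else c) := by
  intro l
  induction l with
  | nil =>
      intro fuel acc _
      cases fuel <;> simp [PySem.Chars.replace.go]
  | cons c t ih =>
      intro fuel acc hf
      match fuel with
      | f + 1 =>
        rw [PySem.Chars.replace.go]
        by_cases hco : c = o
        · have hp : [o].isPrefixOf (c :: t) = true := by simp [List.isPrefixOf, hco]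
          rw [if_pos hp]
          have hd : List.drop ([o].length) (c :: t) = t := by simp
          rw [hd, ih f _ (by simpa using hf)]
          simp [hco]
        · have hp : ¬ ([o].isPrefixOf (c :: t) = true) := by simp [List.isPrefixOf]; exact fun h => (hco h.symm).elim
          rw [if_neg hp, ih f _ (by simpa using hf)]
          simp [hco]

theorem replace_single (s : List Char) (o nw : Char) :
    PySem.Chars.replace s [o] [nw] = s.map (fun c => if c = o then nw else c) := by
  rw [PySem.Chars.replace]
  simp only [List.isEmpty_cons, if_neg]
  rw [replace_go_single o nw s s.length [] (le_refl _)]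
  simp

---------------------------------------------------------------- bitwise bridges

theorem sub_and_eq_ldiff (m : Nat) : ∀ n : Nat, m - (m &&& n) = m.ldiff n := by
  induction m using Nat.strong_induction_on with
  | _ m ih =>
    intro n
    by_cases hm : m = 0
    · subst hm
      have : Nat.ldiff 0 n = 0 := by
        apply Nat.eq_of_testBit_eq
        intro i
        simp [Nat.testBit_ldiff]
      simp [this]
    · have hA2 : (m &&& n) / 2 = (m / 2) &&& (n / 2) := Nat.and_div_two
      have hL2 : (m.ldiff n) / 2 = (m / 2).ldiff (n / 2) := by
        apply Nat.eq_of_testBit_eq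
        intro i
        rw [Nat.testBit_div_two, Nat.testBit_ldiff, Nat.testBit_ldiff,
          Nat.testBit_div_two, Nat.testBit_div_two]
      have hA0 : ((m &&& n) % 2 = 1) ↔ (m % 2 = 1 ∧ n % 2 = 1) := by
        have := Nat.testBit_and m n 0
        simp only [Nat.testBit_zero] at this
        simpa using congrArg (· = true) this |>.to_iff
      have hL0 : ((m.ldiff n) % 2 = 1) ↔ (m % 2 = 1 ∧ ¬ (n % 2 = 1)) := by
        have := Nat.testBit_ldiff m n 0
        simp only [Nat.testBit_zero] at this
        simpa using congrArg (· = true) this |>.to_iff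
      have hIH : m / 2 - ((m / 2) &&& (n / 2)) = (m / 2).ldiff (n / 2) :=
        ih (m / 2) (Nat.div_lt_self (by omega) (by omega)) (n / 2)
      have hle : (m / 2) &&& (n / 2) ≤ m / 2 := Nat.and_le_left
      have hle2 : m &&& n ≤ m := Nat.and_le_left
      omega

theorem band_eq_land (a b : Int) : PySem.Int.band a b = Int.land a b := by
  have hns : ∀ q : Nat, -Int.negSucc q - 1 = Int.ofNat q := by
    intro q; rw [Int.negSucc_eq, Int.ofNat_eq_natCast]; ring
  cases a with
  | ofNat m =>
    cases b with
    | ofNat n =>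
      simp [PySem.Int.band, Int.land, Int.ofNat_nonneg]
    | negSucc n =>
      simp [PySem.Int.band, Int.land, Int.ofNat_nonneg, Int.negSucc_not_nonneg, hns,
        sub_and_eq_ldiff]
  | negSucc m =>
    cases b with
    | ofNat n =>
      simp [PySem.Int.band, Int.land, Int.ofNat_nonneg, Int.negSucc_not_nonneg, hns,
        sub_and_eq_ldiff]
    | negSucc n =>
      simp [PySem.Int.band, Int.land, Int.negSucc_not_nonneg, hns, Int.negSucc_eq]
      rw [if_neg (by omega), if_neg (by omega)]
      ring

theorem bor_eq_lor (a b : Int) : PySem.Int.bor a b = Int.lor a b := by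
  have hns : ∀ q : Nat, -Int.negSucc q - 1 = Int.ofNat q := by
    intro q; rw [Int.negSucc_eq, Int.ofNat_eq_natCast]; ring
  cases a with
  | ofNat m =>
    cases b with
    | ofNat n =>
      simp [PySem.Int.bor, Int.lor, Int.ofNat_nonneg]
    | negSucc n =>
      simp [PySem.Int.bor, Int.lor, Int.ofNat_nonneg, Int.negSucc_not_nonneg, hns,
        sub_and_eq_ldiff, Int.negSucc_eq]
      rw [if_neg (by omega)]
      ring
  | negSucc m =>
    cases b with
    | ofNat n =>
      simp [PySem.Int.bor, Int.lor, Int.ofNat_nonneg, Int.negSucc_not_nonneg, hns,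
        sub_and_eq_ldiff, Int.negSucc_eq]
      rw [if_neg (by omega)]
      ring
    | negSucc n =>
      simp [PySem.Int.bor, Int.lor, Int.negSucc_not_nonneg, hns, Int.negSucc_eq]
      rw [if_neg (by omega), if_neg (by omega)]
      ring

theorem band_mask_bounds (x msk : Int) (h : 0 ≤ msk) :
    0 ≤ PySem.Int.band x msk ∧ PySem.Int.band x msk ≤ msk := by
  rw [PySem.Int.band]
  by_cases hx : 0 ≤ x
  · rw [if_pos hx, if_pos h]
    constructor
    · exact Int.ofNat_nonneg _
    · have h1 : x.toNat &&& msk.toNat ≤ msk.toNat := Nat.and_le_right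
      omega
  · rw [if_neg hx, if_pos h]
    have h1 : msk.toNat &&& (-x - 1).toNat ≤ msk.toNat := Nat.and_le_left
    constructor
    · exact Int.ofNat_nonneg _
    · omega

theorem one_shiftLeft (m : Nat) : (1 : Int) <<< m = ((2 ^ m : Nat) : Int) := by
  rw [Int.shiftLeft_eq]
  push_cast
  ring

theorem testBit_toNat (v : Int) (h : 0 ≤ v) (k : Nat) :
    v.toNat.testBit k = v.testBit k := by
  cases v with
  | ofNat p => rfl
  | negSucc p => exact absurd h (Int.negSucc_not_nonneg p).mp

theorem band_shift_testBit (x : Int) (k : Nat) :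
    (PySem.Int.band (x >>> k) 1 ≠ 0) ↔ x.testBit k = true := by
  have hsh : ∀ p : Nat, Nat.testBit p k = Nat.testBit (p >>> k) 0 := by
    intro p
    rw [Nat.testBit_shiftRight, Nat.add_zero]
  cases x with
  | ofNat p =>
    have h1 : (Int.ofNat p) >>> k = Int.ofNat (p >>> k) := rfl
    rw [h1]
    have h2 : PySem.Int.band (Int.ofNat (p >>> k)) 1 = ((p >>> k) &&& 1 : Nat) := by
      rw [Int.ofNat_eq_natCast]
      exact_mod_cast PySem.Int.band_natCast (p >>> k) 1
    rw [h2]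
    show ¬ ((((p >>> k) &&& 1 : Nat) : Int) = 0) ↔ Nat.testBit p k = true
    rw [hsh]
    generalize p >>> k = q
    rw [Nat.and_one_is_mod, Nat.testBit_zero]
    simp
    omega
  | negSucc p =>
    have h1 : (Int.negSucc p) >>> k = Int.negSucc (p >>> k) := rfl
    rw [h1]
    have h2 : PySem.Int.band (Int.negSucc (p >>> k)) 1
        = ((1 - ((p >>> k) &&& 1) : Nat) : Int) := by
      rw [PySem.Int.band]
      rw [if_neg (by
        intro hcon
        rw [Int.negSucc_eq] at hcon
        have := Int.natCast_nonneg (p >>> k)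
        omega), if_pos (by norm_num)]
      have h3 : (-Int.negSucc (p >>> k) - 1).toNat = p >>> k := by
        rw [Int.negSucc_eq]
        have h4 : -(-(((p >>> k : Nat) : Int) + 1)) - 1 = ((p >>> k : Nat) : Int) := by ring
        rw [h4, Int.toNat_natCast]
      rw [h3]
      norm_num [Nat.and_comm]
    rw [h2]
    show ¬ (((1 - ((p >>> k) &&& 1) : Nat) : Int) = 0) ↔ (!(Nat.testBit p k)) = true
    rw [hsh]
    generalize p >>> k = q
    rw [Nat.and_one_is_mod, Nat.testBit_zero]
    simp
    omega


---------------------------------------------------------------- one row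

theorem rowEq (m : Nat) (hm : 1 ≤ m) (a b : Int) :
    String.mk ((List.range m).map (fun j =>
        if PySem.Int.band (a >>> (m - 1 - j)) 1 ≠ 0 ∨ PySem.Int.band (b >>> (m - 1 - j)) 1 ≠ 0
        then '#' else ' '))
      = PySem.Str.replace (PySem.Str.replace
          (PySem.Str.zfill (PySem.Int.toBin (PySem.Int.band (PySem.Int.bor a b) ((1:Int) <<< m - 1))) (m : Int))
          "1" "#") "0" " " := by
  have h2m : (1:Nat) ≤ 2 ^ m := Nat.one_le_two_pow
  have hmaskNat : (1 : Int) <<< m - 1 = ((2 ^ m - 1 : Nat) : Int) := by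
    rw [one_shiftLeft, Int.natCast_sub h2m]
    norm_num
  have hmask0 : (0:Int) ≤ (1:Int) <<< m - 1 := by rw [hmaskNat]; exact Int.natCast_nonneg _
  obtain ⟨hv0, hv1⟩ := band_mask_bounds (PySem.Int.bor a b) _ hmask0
  set v := PySem.Int.band (PySem.Int.bor a b) ((1:Int) <<< m - 1) with hv
  have hvlt : v.toNat < 2 ^ m := by
    rw [hmaskNat] at hv1
    omega
  have hbit : ∀ k, k < m → v.toNat.testBit k = (a.testBit k || b.testBit k) := by
    intro k hk
    rw [testBit_toNat v hv0, hv, band_eq_land, bor_eq_lor, hmaskNat, Int.testBit_land,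
      Int.testBit_lor]
    have hmb : ((2 ^ m - 1 : Nat) : Int).testBit k = true := by
      show Nat.testBit (2 ^ m - 1) k = true
      rw [Nat.testBit_two_pow_sub_one]
      simp [hk]
    rw [hmb, Bool.and_true]
  have hrhs : (PySem.Str.replace (PySem.Str.replace
        (PySem.Str.zfill (PySem.Int.toBin v) (m : Int)) "1" "#") "0" " ").toList
      = (List.range m).map (fun j => if v.toNat.testBit (m - 1 - j) then '#' else ' ') := by
    rw [PySem.Str.toList_replace, PySem.Str.toList_replace, PySem.Str.toList_zfill,
      PySem.Int.toList_toBin]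
    have ht1 : ("1" : String).toList = ['1'] := rfl
    have ht2 : ("#" : String).toList = ['#'] := rfl
    have ht3 : ("0" : String).toList = ['0'] := rfl
    have ht4 : (" " : String).toList = [' '] := rfl
    rw [ht1, ht2, ht3, ht4]
    rw [PySem.Int.toBinChars, if_neg (by omega), toDigits_two,
      zfill_digits _ _ (binNat_ne_nil _) (binNat_all _), Int.toNat_natCast,
      padBin_eq m hm v.toNat hvlt, replace_single, replace_single, List.map_map, List.map_map]
    apply List.map_congr_left
    intro j _
    by_cases hb : v.toNat.testBit (m - 1 - j) <;> simp [hb]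
  have hlhs : (List.range m).map (fun j =>
        if PySem.Int.band (a >>> (m - 1 - j)) 1 ≠ 0 ∨ PySem.Int.band (b >>> (m - 1 - j)) 1 ≠ 0
        then '#' else ' ')
      = (List.range m).map (fun j => if v.toNat.testBit (m - 1 - j) then '#' else ' ') := by
    apply List.map_congr_left
    intro j hj
    rw [List.mem_range] at hj
    have hk : m - 1 - j < m := by omega
    rw [hbit _ hk]
    by_cases ha : a.testBit (m - 1 - j) = true
    · rw [if_pos (Or.inl ((band_shift_testBit a _).mpr ha)), ha]
      simp
    · by_cases hb2 : b.testBit (m - 1 - j) = true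
      · rw [if_pos (Or.inr ((band_shift_testBit b _).mpr hb2)), hb2]
        simp
      · rw [if_neg]
        · simp [Bool.not_eq_true] at ha hb2
          rw [ha, hb2]
          rfl
        · rintro (h | h)
          · exact ha ((band_shift_testBit a _).mp h)
          · exact hb2 ((band_shift_testBit b _).mp h)
  rw [hlhs, ← hrhs]
  exact String.ofList_toList

theorem zipWith_map_same {α β γ δ : Type} (f : β → γ → δ) (g : α → β) (h : α → γ) (l : List α) :
    List.zipWith f (l.map g) (l.map h) = l.map (fun x => f (g x) (h x)) := by
  induction l with
  | nil => rfl
  | cons x xs ih => simp [ih]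

-- ===== VERDICT (by name: the statement is the Claim_ definition above) =====
theorem solution_spec : Claim_equal_solution := by
  intro n arr1 arr2 _ hpre
  obtain ⟨h1, h2⟩ := hpre
  unfold Spec_solution solution solution_alt
  by_cases hn : n ≤ 0
  · have hA : PySem.List.pyRange 0 n 1 = [] := by
      apply List.eq_nil_iff_forall_not_mem.mpr
      intro x hx
      have := (PySem.List.mem_pyRange_one).1 hx
      omega
    rw [if_pos hn]
    simp [hA]
  · push_neg at hn
    have hm1 : 1 ≤ n.toNat := by omega
    have hnm : (n.toNat : Int) = n := by omega
    rw [if_neg (by omega)]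
    dsimp only
    rw [PySem.List.slice_to arr1 (by omega), PySem.List.slice_to arr2 (by omega),
      PySem.List.foldl_append_singleton_eq_map, zipWith_map_same, List.map_map]
    have hrange := PySem.List.pyRange_zero_natCast n.toNat
    rw [hnm] at hrange
    rw [hrange, List.map_map, List.nil_append]
    have hlen1 : n.toNat ≤ arr1.length := by omega
    have hlen2 : n.toNat ≤ arr2.length := by omega
    apply List.ext_getElem
    · simp
      omega
    · intro i hi hi'
      simp only [List.getElem_map, List.getElem_range, List.getElem_zip, List.getElem_take]
      have hi1 : i < n.toNat := by simpa using hi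
      have hga : PySem.List.pyGetD arr1 ((i : Nat) : Int) 0 = arr1[i] := by
        rw [PySem.List.pyGetD_natCast, List.getD_eq_getElem _ _ (by omega)]
      have hgb : PySem.List.pyGetD arr2 ((i : Nat) : Int) 0 = arr2[i] := by
        rw [PySem.List.pyGetD_natCast, List.getD_eq_getElem _ _ (by omega)]
      simp only [Function.comp_apply, hga, hgb]
      rw [← List.reverse_zipWith (by rw [rowBits_length, rowBits_length]), rowChars, revmap]
      have hr := rowEq n.toNat hm1 arr1[i] arr2[i]
      rw [hnm] at hr
      exact hr
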